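-- pv_equiv track=rewrite | github.com/Soyaha/XMU-SE | 大三上/数学建模/期中答案/5.py | analyze_list
-- ===== SOURCE A (Python) =====
-- def analyze_list(data):
--     # （1）计算每个元素的出现频率
--     frequency = {}
--     for item in data:
--         if item in frequency:
--             frequency[item] += 1
--         else:
--             frequency[item] = 1
--
--     # （2）移除重复元素，保持原有顺序
--     seen = set()
--     unique_ordered = []
--     for item in data:
--         if item not in seen:
--             seen.add(item)  #标记为已出现
--             unique_ordered.append(item)  #添加到结果列表
--
--     return frequency, unique_ordered
-- ===== SOURCE B (Python) =====
-- def analyze_list(data):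
--     # Single pass: the frequency dict itself marks "already seen".
--     frequency = {}
--     unique_ordered = []
--     for item in data:
--         if item in frequency:
--             frequency[item] += 1
--         else:
--             frequency[item] = 1
--             unique_ordered.append(item)
--     return frequency, unique_ordered
-- ===== Notes on version B (the rewrite author's own statement) =====
-- stated objective: simpler
-- what changed: Fuses A's two loops (a counting loop over a dict plus a dedup loop over a separate seen-set and list) into one pass that maintains only the dict and the ordered list, using the dict's keys themselves as the seen-marker.
import Mathlib
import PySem

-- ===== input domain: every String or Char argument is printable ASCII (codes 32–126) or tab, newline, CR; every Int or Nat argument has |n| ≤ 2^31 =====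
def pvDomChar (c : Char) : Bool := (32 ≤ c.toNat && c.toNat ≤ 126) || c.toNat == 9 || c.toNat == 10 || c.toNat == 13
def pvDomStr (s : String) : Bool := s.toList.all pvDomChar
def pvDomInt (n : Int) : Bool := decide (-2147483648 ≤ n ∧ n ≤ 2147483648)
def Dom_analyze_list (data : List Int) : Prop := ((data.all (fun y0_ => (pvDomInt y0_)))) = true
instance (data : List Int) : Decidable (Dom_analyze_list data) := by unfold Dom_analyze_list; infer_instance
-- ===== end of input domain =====

-- B fuses A's two passes (count into a dict; dedup via a separate seen-set) into one
-- pass maintaining only the dict and the ordered list (the dict's keys are the seen-marker); same O(n) cost, simpler.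


-- ===== PORT A =====
def analyze_list (data : List Int) : (List (Int × Int)) × List Int :=
  -- (1) frequency loop
  let frequency : PySem.Dict Int Int :=
    data.foldl
      (fun d item =>
        if d.contains item then d.insert item (d.getD item 0 + 1)
        else d.insert item 1)
      PySem.Dict.empty
  -- (2) dedup loop with a separate seen set
  let su : PySem.Set Int × List Int :=
    data.foldl
      (fun p item =>
        if PySem.Set.contains p.1 item then p
        else (PySem.Set.add p.1 item, p.2 ++ [item]))
      (PySem.Set.empty, [])
  (frequency.items, su.2)

-- ===== PORT B =====
def analyze_list_alt (data : List Int) : (List (Int × Int)) × List Int :=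
  let st : PySem.Dict Int Int × List Int :=
    data.foldl
      (fun p item =>
        if p.1.contains item then (p.1.insert item (p.1.getD item 0 + 1), p.2)
        else (p.1.insert item 1, p.2 ++ [item]))
      (PySem.Dict.empty, [])
  (st.1.items, st.2)

-- ===== PRECONDITION & SPEC =====
def Spec_analyze_list (data : List Int) (out : (List (Int × Int)) × List Int) : Prop := out = analyze_list_alt data
instance (data : List Int) (out : (List (Int × Int)) × List Int) : Decidable (Spec_analyze_list data out) := by unfold Spec_analyze_list; infer_instance

-- ===== CLAIM (what is proved, stated in full; the proofs are below) =====
def Claim_equal_analyze_list : Prop := ∀ (data : List Int), Dom_analyze_list data → Spec_analyze_list data (analyze_list data)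

-- ===== LEMMAS AND PROOFS =====

-- The fused loop of B equals A's two separate loops, from any state whose seen set is the dict's key list.
theorem fused_eq (l : List Int) (d : PySem.Dict Int Int) (u : List Int) :
    l.foldl
      (fun p item =>
        if p.1.contains item then (p.1.insert item (p.1.getD item 0 + 1), p.2)
        else (p.1.insert item 1, p.2 ++ [item]))
      (d, u)
    = (l.foldl
        (fun d item =>
          if d.contains item then d.insert item (d.getD item 0 + 1)
          else d.insert item 1) d,
       (l.foldl
         (fun p item =>
           if PySem.Set.contains p.1 item then p
           else (PySem.Set.add p.1 item, p.2 ++ [item]))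
         ((d.keys : PySem.Set Int), u)).2) := by
  induction l generalizing d u with
  | nil => rfl
  | cons x l ih =>
    simp only [List.foldl_cons]
    by_cases hc : d.contains x = true
    · have hs : PySem.Set.contains (d.keys : PySem.Set Int) x = true := by
        simpa [PySem.Set.contains_iff, ← PySem.Dict.contains_iff_mem_keys] using hc
      rw [if_pos hc, if_pos hc, if_pos hs]
      have hk : (d.insert x (d.getD x 0 + 1)).keys = d.keys :=
        PySem.Dict.keys_insert_of_contains d _ hc
      simpa [hk] using ih (d.insert x (d.getD x 0 + 1)) u
    · have hxm : x ∉ d.keys := fun hx =>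
        hc ((PySem.Dict.contains_iff_mem_keys d x).mpr hx)
      rw [if_neg (by simp [hc]), if_neg (by simp [hc]), if_neg (by simp [hxm])]
      have hk : (d.insert x 1).keys = d.keys ++ [x] :=
        PySem.Dict.keys_insert_of_not_contains d _ (by simp [hc])
      have ha : PySem.Set.add (d.keys : PySem.Set Int) x = d.keys ++ [x] :=
        PySem.Set.add_of_not_mem hxm
      simpa [hk, ha] using ih (d.insert x 1) (u ++ [x])

-- ===== VERDICT (by name: the statement is the Claim_ definition above) =====
theorem analyze_list_spec : Claim_equal_analyze_list := by
  intro data _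
  unfold Spec_analyze_list analyze_list analyze_list_alt
  rw [fused_eq]
  simp [PySem.Dict.keys_empty]
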